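-- pv_equiv track=rewrite | github.com/daidaiclub/Careerhack-2025-RealTime-Translate-System | src/realtime_translate_system/services/term_matcher.py | annotate_text
-- ===== SOURCE A (Python) =====
-- def annotate_text(input_text: str, final_matched: list) -> str:
--     """
--     將匹配到的專有名詞在前後標記 `==`，
--     完全依據 final_matched 列表中的專有名詞進行標記，不轉成小寫。
--     """
--     # 依據專有名詞長度降冪排序，避免較短字串提前匹配
--     final_matched_sorted = sorted(final_matched, key=lambda x: len(x[0]), reverse=True)
--
--     annotated_text = []
--     i = 0
--     n = len(input_text)
--
--     while i < n:
--         matched = False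
--         for token, _, _, _ in final_matched_sorted:
--             token_len = len(token)
--             if i + token_len <= n and input_text[i:i+token_len] == token:
--                 annotated_text.append(f"=={token}==")
--                 i += token_len
--                 matched = True
--                 break
--         if not matched:
--             annotated_text.append(input_text[i])
--             i += 1
--
--     return "".join(annotated_text)
-- ===== SOURCE B (Python) =====
-- def annotate_text(input_text: str, final_matched: list) -> str:
--     """
--     Mark matched terms with == markers.
--     Trie-style matcher simulated by a precomputed set of all token prefixes:
--     at each position a single forward walk extends the candidate while it is
--     still a prefix of some token, remembering the last length at which it was
--     a full token (= the longest match); no per-token or per-length probing.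
--     """
--     tokens = set()
--     prefixes = set()
--     for token, _, _, _ in final_matched:
--         tokens.add(token)
--         for k in range(1, len(token) + 1):
--             prefixes.add(token[:k])
--     out = []
--     i = 0
--     n = len(input_text)
--     while i < n:
--         best = 0
--         j = i
--         while j < n and input_text[i:j + 1] in prefixes:
--             j += 1
--             if input_text[i:j] in tokens:
--                 best = j - i
--         if best:
--             out.append("==" + input_text[i:i + best] + "==")
--             i += best
--         else:
--             out.append(input_text[i])
--             i += 1
--     return "".join(out)
-- ===== Notes on version B (the rewrite author's own statement) =====
-- stated objective: faster
-- what changed: Replaces A's per-position scan over the whole length-sorted token list by a trie simulated with a precomputed set of all token prefixes: each position does one forward walk that extends the candidate while it remains a viable prefix and records the last full-token length, so the per-token probing disappears. Pre_ excludes lists containing an empty-string token, on which A loops forever as soon as some text position has no nonempty match (B returns the text unannotated there).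
-- outside the precondition, e.g. on annotate_text('', [('', 0, 0, 0)]): A returns '', B returns ''; on annotate_text('a', [('', 0, 0, 0)]): A does not finish within the time limit, B returns 'a'
import Mathlib
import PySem

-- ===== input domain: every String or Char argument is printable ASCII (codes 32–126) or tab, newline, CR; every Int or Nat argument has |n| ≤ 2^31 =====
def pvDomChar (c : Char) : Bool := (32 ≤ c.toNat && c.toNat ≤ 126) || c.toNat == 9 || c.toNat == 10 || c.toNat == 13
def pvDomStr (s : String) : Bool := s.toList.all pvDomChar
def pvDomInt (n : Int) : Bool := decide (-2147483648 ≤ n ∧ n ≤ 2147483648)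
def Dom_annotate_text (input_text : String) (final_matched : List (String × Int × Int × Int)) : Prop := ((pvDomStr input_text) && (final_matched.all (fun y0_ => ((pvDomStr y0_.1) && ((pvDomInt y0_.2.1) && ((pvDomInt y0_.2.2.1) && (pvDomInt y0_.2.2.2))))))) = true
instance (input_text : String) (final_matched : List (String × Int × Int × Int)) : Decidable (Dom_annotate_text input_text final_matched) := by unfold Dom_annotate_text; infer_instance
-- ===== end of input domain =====

-- B replaces A's per-position scan of the length-sorted token list by a trie simulated with a
-- precomputed set of all token prefixes: one forward walk per position records the longest match
-- (measurably faster on many-token inputs).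

-- ===== PORT A =====
-- the inner 'for token, _, _, _ in final_matched_sorted: … break' is a find? of the match condition
def pvMatchA (chars : List Char) (t : String × Int × Int × Int) : Bool :=
  decide (t.1.toList.length ≤ chars.length ∧ chars.take t.1.toList.length = t.1.toList)

-- the while loop; fuel = remaining characters (each iteration consumes at least one char on Pre_)
def pvLoopA (s : List (String × Int × Int × Int)) : Nat → List Char → List Char → List Char
  | 0, _, acc => acc
  | _ + 1, [], acc => acc
  | fuel + 1, c :: rest, acc =>
    match (s.find? (pvMatchA (c :: rest))) with
    | some t => pvLoopA s fuel ((c :: rest).drop t.1.toList.length)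
        (acc ++ ('=' :: '=' :: t.1.toList ++ ['=', '=']))
    | none => pvLoopA s fuel rest (acc ++ [c])

def annotate_text (input_text : String) (final_matched : List (String × Int × Int × Int)) : String :=
  let s := PySem.List.sorted final_matched (fun x => PySem.Str.len x.1) true
  String.ofList (pvLoopA s input_text.toList.length input_text.toList [])

-- ===== PORT B =====
-- the building pass: tokens set and the set of all nonempty token prefixes (token[:k] = slice to k)
def pvBuildSets (fm : List (String × Int × Int × Int)) : PySem.Set String × PySem.Set String :=
  fm.foldl (fun st t =>
    (PySem.Set.add st.1 t.1,
     (PySem.List.pyRange 1 (PySem.Str.len t.1 + 1) 1).foldl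
       (fun ps k => PySem.Set.add ps (String.ofList (PySem.List.slice t.1.toList none (some k)))) st.2))
    ([], [])

-- the inner walk; the slices input_text[i:j] / input_text[j:] are carried as the split pre/rest,
-- best as in Source B
def pvWalkB (tokens prefixes : PySem.Set String) : List Char → List Char → Nat → Nat
  | _, [], best => best
  | pre, c :: rs, best =>
    if PySem.Set.contains prefixes (String.ofList (pre ++ [c])) then
      pvWalkB tokens prefixes (pre ++ [c]) rs
        (if PySem.Set.contains tokens (String.ofList (pre ++ [c])) then (pre ++ [c]).length else best)
    else best

-- the outer while loop; fuel as in port A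
def pvLoopB (tokens prefixes : PySem.Set String) : Nat → List Char → List Char → List Char
  | 0, _, acc => acc
  | _ + 1, [], acc => acc
  | fuel + 1, c :: rest, acc =>
    let best := pvWalkB tokens prefixes [] (c :: rest) 0
    if best ≠ 0 then
      pvLoopB tokens prefixes fuel ((c :: rest).drop best)
        (acc ++ ('=' :: '=' :: (c :: rest).take best ++ ['=', '=']))
    else pvLoopB tokens prefixes fuel rest (acc ++ [c])

def annotate_text_alt (input_text : String) (final_matched : List (String × Int × Int × Int)) : String :=
  let st := pvBuildSets final_matched
  String.ofList (pvLoopB st.1 st.2 input_text.toList.length input_text.toList [])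

-- ===== PRECONDITION & SPEC =====
-- Pre_ excludes lists containing an empty-string token, on which A loops forever as soon as some
-- text position has no nonempty match (B returns the text unannotated there).
def Pre_annotate_text (input_text : String) (final_matched : List (String × Int × Int × Int)) : Prop :=
  ∀ t ∈ final_matched, t.1 ≠ ""
instance (input_text : String) (final_matched : List (String × Int × Int × Int)) : Decidable (Pre_annotate_text input_text final_matched) := by unfold Pre_annotate_text; infer_instance

def pvWitness_annotate_text : String × (List (String × Int × Int × Int)) :=
  ("abc ab", [("ab", 1, 2, 3), ("abc", 0, 0, 0)])

def Spec_annotate_text (input_text : String) (final_matched : List (String × Int × Int × Int)) (out : String) : Prop := out = annotate_text_alt input_text final_matched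
instance (input_text : String) (final_matched : List (String × Int × Int × Int)) (out : String) : Decidable (Spec_annotate_text input_text final_matched out) := by unfold Spec_annotate_text; infer_instance

-- ===== CLAIM (what is proved, stated in full; the proofs are below) =====
def Claim_equal_annotate_text : Prop := ∀ (input_text : String) (final_matched : List (String × Int × Int × Int)), Dom_annotate_text input_text final_matched → Pre_annotate_text input_text final_matched → Spec_annotate_text input_text final_matched (annotate_text input_text final_matched)

-- ===== LEMMAS AND PROOFS =====

-- abbreviations used only by the proofs
def pvSortedA (fm : List (String × Int × Int × Int)) : List (String × Int × Int × Int) :=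
  PySem.List.sorted fm (fun x => PySem.Str.len x.1) true

def pvStep (st : PySem.Set String × PySem.Set String) (t : String × Int × Int × Int) :
    PySem.Set String × PySem.Set String :=
  (PySem.Set.add st.1 t.1,
   (PySem.List.pyRange 1 (PySem.Str.len t.1 + 1) 1).foldl
     (fun ps k => PySem.Set.add ps (String.ofList (PySem.List.slice t.1.toList none (some k)))) st.2)

theorem pvBuildSets_eq_foldl (fm : List (String × Int × Int × Int)) :
    pvBuildSets fm = fm.foldl pvStep ([], []) := rfl

theorem pvBuild_aux (fm : List (String × Int × Int × Int)) :
    ∀ (ts ps : PySem.Set String),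
      (∀ s, s ∈ (fm.foldl pvStep (ts, ps)).1 ↔ s ∈ ts ∨ ∃ t ∈ fm, t.1 = s) ∧
      (∀ s, s ∈ ps → s ∈ (fm.foldl pvStep (ts, ps)).2) ∧
      (∀ t ∈ fm, ∀ k : Nat, 1 ≤ k → k ≤ t.1.toList.length →
        String.ofList (t.1.toList.take k) ∈ (fm.foldl pvStep (ts, ps)).2) := by
  induction fm with
  | nil => intro ts ps; refine ⟨by simp, by simp, by simp⟩
  | cons t fm ih =>
    intro ts ps
    have hstep : (t :: fm).foldl pvStep (ts, ps) = fm.foldl pvStep (pvStep (ts, ps) t) := rfl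
    obtain ⟨ih1, ih2, ih3⟩ := ih (pvStep (ts, ps) t).1 (pvStep (ts, ps) t).2
    refine ⟨?_, ?_, ?_⟩
    · intro s
      rw [hstep, ih1]
      simp only [pvStep, PySem.Set.mem_add, List.mem_cons]
      constructor
      · rintro ((h | h) | h)
        · exact Or.inl h
        · exact Or.inr ⟨t, Or.inl rfl, h.symm⟩
        · obtain ⟨t', ht', h⟩ := h; exact Or.inr ⟨t', Or.inr ht', h⟩
      · rintro (h | ⟨t', (rfl | ht'), h⟩)
        · exact Or.inl (Or.inl h)
        · exact Or.inl (Or.inr h.symm)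
        · exact Or.inr ⟨t', ht', h⟩
    · intro s hs
      rw [hstep]
      apply ih2
      simp only [pvStep]
      rw [PySem.Set.mem_foldl_add]
      exact Or.inl hs
    · intro t' ht' k hk1 hk2
      rcases List.mem_cons.mp ht' with rfl | ht'
      · rw [hstep]
        apply ih2
        simp only [pvStep]
        rw [PySem.Set.mem_foldl_add]
        refine Or.inr ⟨(k : Int), ?_, ?_⟩
        · rw [PySem.List.mem_pyRange_one, PySem.Str.len_eq]
          omega
        · rw [PySem.List.slice_to _ (by positivity)]
          simp
      · rw [hstep]; exact ih3 t' ht' k hk1 hk2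

theorem pvMatchA_iff (chars : List Char) (t : String × Int × Int × Int) :
    pvMatchA chars t = true ↔
      t.1.toList.length ≤ chars.length ∧ chars.take t.1.toList.length = t.1.toList := by
  simp [pvMatchA]

-- tokens-set membership
theorem pvBuild_mem_tokens (fm : List (String × Int × Int × Int)) (s : String) :
    s ∈ (pvBuildSets fm).1 ↔ ∃ t ∈ fm, t.1 = s := by
  rw [pvBuildSets_eq_foldl, (pvBuild_aux fm [] []).1 s]
  simp

-- prefixes-set completeness: every nonempty prefix of a token is in the set
theorem pvBuild_mem_prefixes (fm : List (String × Int × Int × Int))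
    {t : String × Int × Int × Int} (ht : t ∈ fm) (k : Nat) (hk1 : 1 ≤ k)
    (hk2 : k ≤ t.1.toList.length) :
    String.ofList (t.1.toList.take k) ∈ (pvBuildSets fm).2 := by
  rw [pvBuildSets_eq_foldl]
  exact (pvBuild_aux fm [] []).2.2 t ht k hk1 hk2

-- the walk result never drops below a best already ≤ the consumed length
theorem pvWalk_ge_best (tokens prefixes : PySem.Set String) :
    ∀ (rest pre : List Char) (best : Nat), best ≤ pre.length →
      best ≤ pvWalkB tokens prefixes pre rest best := by
  intro rest
  induction rest with
  | nil => intro pre best _; simp [pvWalkB]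
  | cons c rs ih =>
    intro pre best hb
    by_cases hc : PySem.Set.contains prefixes (String.ofList (pre ++ [c])) = true
    · simp only [pvWalkB, hc, if_true]
      by_cases htok : PySem.Set.contains tokens (String.ofList (pre ++ [c])) = true
      · simp only [htok, if_true]
        calc best ≤ (pre ++ [c]).length := by simp; omega
          _ ≤ _ := ih (pre ++ [c]) (pre ++ [c]).length le_rfl
      · simp only [htok]
        exact ih (pre ++ [c]) best (by simp; omega)
    · simp only [pvWalkB]
      rw [if_neg hc]

-- completeness: any matching token forces the walk at least to its length
theorem pvWalk_ge (fm : List (String × Int × Int × Int)) (chars : List Char) :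
    ∀ (rest pre : List Char) (best : Nat), pre ++ rest = chars →
      pre = chars.take pre.length →
      ∀ t ∈ fm, pvMatchA chars t = true → pre.length < t.1.toList.length →
        t.1.toList.length ≤ pvWalkB (pvBuildSets fm).1 (pvBuildSets fm).2 pre rest best := by
  intro rest
  induction rest with
  | nil =>
    intro pre best hcat hpre t ht hm hL
    obtain ⟨hlen, htake⟩ := (pvMatchA_iff chars t).mp hm
    rw [List.append_nil] at hcat
    subst hcat
    omega
  | cons c rs ih =>
    intro pre best hcat hpre t ht hm hL
    obtain ⟨hlen, htake⟩ := (pvMatchA_iff chars t).mp hm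
    have hpre' : pre ++ [c] = chars.take (pre.length + 1) := by
      rw [← hcat, List.take_append, List.take_of_length_le (by omega)]
      simp
    have hpre'' : pre ++ [c] = t.1.toList.take (pre.length + 1) := by
      rw [← htake, List.take_take, min_eq_left (by omega), hpre']
    have hmem : String.ofList (pre ++ [c]) ∈ (pvBuildSets fm).2 := by
      rw [hpre'']
      exact pvBuild_mem_prefixes fm ht (pre.length + 1) (by omega) (by omega)
    have hc : PySem.Set.contains (pvBuildSets fm).2 (String.ofList (pre ++ [c])) = true := by
      rw [PySem.Set.contains_iff]; exact hmem
    simp only [pvWalkB, hc, if_true]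
    by_cases heq : pre.length + 1 = t.1.toList.length
    · have hfull : pre ++ [c] = t.1.toList := by
        rw [hpre'', heq, List.take_of_length_le le_rfl]
      have htok : PySem.Set.contains (pvBuildSets fm).1 (String.ofList (pre ++ [c])) = true := by
        rw [PySem.Set.contains_iff, pvBuild_mem_tokens]
        exact ⟨t, ht, by rw [hfull]; simp⟩
      simp only [htok, if_true]
      calc t.1.toList.length = (pre ++ [c]).length := by
            rw [List.length_append, List.length_singleton]; omega
        _ ≤ _ := pvWalk_ge_best _ _ rs (pre ++ [c]) _ le_rfl
    · have hlt : (pre ++ [c]).length < t.1.toList.length := by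
        rw [List.length_append, List.length_singleton]; omega
      exact ih (pre ++ [c])
        (if PySem.Set.contains (pvBuildSets fm).1 (String.ofList (pre ++ [c])) = true
          then (pre ++ [c]).length else best)
        (by simpa using hcat)
        (by rw [hpre']; simp)
        t ht hm hlt

-- soundness: the walk returns its initial best or the length of some matching token
theorem pvWalk_sound (fm : List (String × Int × Int × Int)) (chars : List Char) :
    ∀ (rest pre : List Char) (best : Nat), pre ++ rest = chars →
      pre = chars.take pre.length →
      pvWalkB (pvBuildSets fm).1 (pvBuildSets fm).2 pre rest best = best ∨
        ∃ t ∈ fm, pvMatchA chars t = true ∧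
          t.1.toList.length = pvWalkB (pvBuildSets fm).1 (pvBuildSets fm).2 pre rest best := by
  intro rest
  induction rest with
  | nil => intro pre best _ _; left; simp [pvWalkB]
  | cons c rs ih =>
    intro pre best hcat hpre
    by_cases hc : PySem.Set.contains (pvBuildSets fm).2 (String.ofList (pre ++ [c])) = true
    · have hpre' : pre ++ [c] = chars.take (pre.length + 1) := by
        rw [← hcat, List.take_append, List.take_of_length_le (by omega)]
        simp
      have hcat' : (pre ++ [c]) ++ rs = chars := by simpa using hcat
      have hpre'' : pre ++ [c] = chars.take (pre ++ [c]).length := by rw [hpre']; simp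
      simp only [pvWalkB, hc, if_true]
      rcases ih (pre ++ [c])
          (if PySem.Set.contains (pvBuildSets fm).1 (String.ofList (pre ++ [c])) = true
            then (pre ++ [c]).length else best) hcat' hpre'' with h | h
      · rw [h]
        by_cases htok : PySem.Set.contains (pvBuildSets fm).1 (String.ofList (pre ++ [c])) = true
        · right
          obtain ⟨t, ht, ht1⟩ := (pvBuild_mem_tokens fm _).mp ((PySem.Set.contains_iff _ _).mp htok)
          have htl : t.1.toList = pre ++ [c] := by rw [ht1]; simp
          have hlen : t.1.toList.length = pre.length + 1 := by rw [htl]; simp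
          have hle : pre.length + 1 ≤ chars.length := by
            rw [← hcat', List.length_append, List.length_append, List.length_singleton]; omega
          refine ⟨t, ht, ?_, ?_⟩
          · rw [pvMatchA_iff, hlen]
            exact ⟨hle, by rw [htl, hpre']⟩
          · rw [if_pos htok, hlen, List.length_append, List.length_singleton]
        · left; rw [if_neg htok]
      · right; exact h
    · left
      simp only [pvWalkB]
      rw [if_neg hc]

-- A's find?: none ↔ no token matches; some t → t matches and has maximal length
theorem pvFindA_none (fm : List (String × Int × Int × Int)) (chars : List Char) :
    (pvSortedA fm).find? (pvMatchA chars) = none ↔ ∀ t ∈ fm, pvMatchA chars t = false := by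
  rw [List.find?_eq_none]
  constructor
  · intro h t ht
    have := h t ((PySem.List.mem_sorted fm _ true t).mpr ht)
    simpa using this
  · intro h t ht
    have := h t ((PySem.List.mem_sorted fm _ true t).mp ht)
    simp [this]

theorem pvFindA_some (fm : List (String × Int × Int × Int)) (chars : List Char)
    {t : String × Int × Int × Int} (h : (pvSortedA fm).find? (pvMatchA chars) = some t) :
    t ∈ fm ∧ pvMatchA chars t = true ∧
      ∀ t' ∈ fm, pvMatchA chars t' = true → t'.1.toList.length ≤ t.1.toList.length := by
  obtain ⟨hpt, as, bs, hS, has⟩ := List.find?_eq_some_iff_append.mp h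
  have hmem : t ∈ fm := (PySem.List.mem_sorted fm _ true t).mp (List.mem_of_find?_eq_some h)
  refine ⟨hmem, hpt, ?_⟩
  intro t' ht' hpt'
  have hpa := PySem.List.sorted_pairwise_rev fm (fun x => PySem.Str.len x.1)
  rw [show PySem.List.sorted fm (fun x => PySem.Str.len x.1) true = pvSortedA fm from rfl,
    hS, List.pairwise_append] at hpa
  have hmem2 : t' ∈ as ++ t :: bs := by
    rw [← hS]; exact (PySem.List.mem_sorted fm _ true t').mpr ht'
  rcases List.mem_append.mp hmem2 with h2 | h2
  · exact absurd hpt' (by simpa using has t' h2)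
  · rcases List.mem_cons.mp h2 with rfl | h2
    · exact le_refl _
    · have hk := (List.pairwise_cons.mp hpa.2.1).1 t' h2
      rw [PySem.Str.len_eq, PySem.Str.len_eq] at hk
      exact_mod_cast hk

-- the two loops agree step by step
theorem pvLoop_agree (fm : List (String × Int × Int × Int))
    (hne : ∀ t ∈ fm, t.1 ≠ "") :
    ∀ (fuel : Nat) (chars acc : List Char),
      pvLoopA (pvSortedA fm) fuel chars acc
        = pvLoopB (pvBuildSets fm).1 (pvBuildSets fm).2 fuel chars acc := by
  intro fuel
  induction fuel with
  | zero => intro chars acc; rfl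
  | succ fuel ih =>
    intro chars acc
    cases chars with
    | nil => rfl
    | cons c rest =>
      cases hA : (pvSortedA fm).find? (pvMatchA (c :: rest)) with
      | none =>
        have hno := (pvFindA_none fm (c :: rest)).mp hA
        have hw : pvWalkB (pvBuildSets fm).1 (pvBuildSets fm).2 [] (c :: rest) 0 = 0 := by
          rcases pvWalk_sound fm (c :: rest) (c :: rest) [] 0 rfl rfl with h | ⟨t, ht, hm, _⟩
          · exact h
          · rw [hno t ht] at hm; cases hm
        rw [pvLoopA, pvLoopB, hA, hw]
        rw [if_neg (by omega)]
        exact ih rest (acc ++ [c])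
      | some t =>
        obtain ⟨hmem, hm, hmax⟩ := pvFindA_some fm (c :: rest) hA
        have hL1 : 1 ≤ t.1.toList.length := by
          have hne' : t.1 ≠ "" := hne t hmem
          have htl : t.1.toList ≠ [] := fun h0 => hne' (by
            rw [← String.ofList_toList (s := t.1), h0])
          exact List.length_pos_of_ne_nil htl
        have hge := pvWalk_ge fm (c :: rest) (c :: rest) [] 0 rfl rfl t hmem hm (by simpa using hL1)
        have hw : pvWalkB (pvBuildSets fm).1 (pvBuildSets fm).2 [] (c :: rest) 0
            = t.1.toList.length := by
          rcases pvWalk_sound fm (c :: rest) (c :: rest) [] 0 rfl rfl with h | ⟨t', ht', hm', hlen'⟩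
          · omega
          · have := hmax t' ht' hm'
            omega
        obtain ⟨hle, htake⟩ := (pvMatchA_iff (c :: rest) t).mp hm
        rw [pvLoopA, pvLoopB, hA, hw]
        rw [if_pos (by omega), htake]
        exact ih _ _

-- ===== VERDICT (by name: the statement is the Claim_ definition above) =====
theorem annotate_text_spec : Claim_equal_annotate_text := by
  intro input fm _ hpre
  unfold Spec_annotate_text annotate_text annotate_text_alt
  exact congrArg String.ofList (pvLoop_agree fm hpre _ _ _)
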